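-- pv_equiv track=rewrite | github.com/sokurii/SWEA | SWEA/Stack/[보충]계산기1.py | get_postfix
-- ===== SOURCE A (Python) =====
-- def get_postfix(infix, n):
--     postfix = ""
--     stack = []
--
--     # i번째 글자에 대해서 연산자면 스택에 넣고 피연산자면 결과에 출력
--     for i in range(n):
--         # 피연산자 이면 출력
--         if "0" <= infix[i] <= "9":
--             postfix += infix[i]
--         # 연산자였다.
--         else:
--             # 스택이 비어있지 않으면
--             if stack:
--                 postfix += stack.pop()
--             # 연산자 스택에 추가
--             stack.append(infix[i])
--
--     # 스택이 빌때까지 남은 연산자를 결과에 출력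
--     while stack:
--         postfix += stack.pop()
--
--     return postfix
-- ===== SOURCE B (Python) =====
-- def get_postfix(infix, n):
--     s = infix[:max(n, 0)]
--     L = len(s)
--     i = 0
--     # leading run of digits goes out verbatim
--     while i < L and "0" <= s[i] <= "9":
--         i += 1
--     parts = [s[:i]]
--     # each operator is emitted AFTER the run of digits that follows it
--     while i < L:
--         op = s[i]
--         j = i + 1
--         while j < L and "0" <= s[j] <= "9":
--             j += 1
--         parts.append(s[i + 1:j])
--         parts.append(op)
--         i = j
--     return "".join(parts)
-- ===== Notes on version B (the rewrite author's own statement) =====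
-- stated objective: alternative
-- what changed: Instead of A's per-character loop with an operator stack, B slices the input into maximal digit runs and emits each operator after the digit run that follows it, joining the pieces at the end; there is no stack and no per-character carried operator state.
import Mathlib
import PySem

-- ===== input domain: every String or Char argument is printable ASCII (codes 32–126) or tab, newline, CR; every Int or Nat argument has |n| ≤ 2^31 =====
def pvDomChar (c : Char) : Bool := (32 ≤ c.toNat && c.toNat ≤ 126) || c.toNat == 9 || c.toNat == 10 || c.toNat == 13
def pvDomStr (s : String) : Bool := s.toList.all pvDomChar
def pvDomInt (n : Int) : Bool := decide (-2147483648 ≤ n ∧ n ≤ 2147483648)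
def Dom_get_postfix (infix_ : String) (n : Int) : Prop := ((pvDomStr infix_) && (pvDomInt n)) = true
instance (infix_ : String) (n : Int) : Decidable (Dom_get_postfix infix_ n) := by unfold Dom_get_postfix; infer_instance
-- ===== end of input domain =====

-- B replaces A's per-character stack loop by a digit-run decomposition: each operator is
-- emitted after the digit run that follows it (objective: alternative structure).

-- ===== PORT A =====
-- loop body of A on the fetched character: digit goes to the output, operator pops the
-- stack top (if any) and is pushed (stack top at head)
def pvBodyA (acc : List Char × List Char) (c : Char) : List Char × List Char :=
  if '0' ≤ c ∧ c ≤ '9' then (acc.1 ++ [c], acc.2)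
  else
    match acc.2 with
    | [] => (acc.1, [c])
    | t :: rest => (acc.1 ++ [t], c :: rest)

-- A's trailing 'while stack: postfix += stack.pop()'
def pvDrainA : List Char → List Char → List Char
  | p, [] => p
  | p, t :: rest => pvDrainA (p ++ [t]) rest

def get_postfix (infix_ : String) (n : Int) : String :=
  let cs := infix_.toList
  let r := (PySem.List.pyRange 0 n 1).foldl
    (fun acc i => pvBodyA acc (PySem.List.pyGetD cs i ' ')) ([], [])
  String.ofList (pvDrainA r.1 r.2)

-- ===== PORT B =====
def pvIsDig (c : Char) : Bool := decide ('0' ≤ c ∧ c ≤ '9')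

-- Source B's outer while loop: list headed by an operator → digit run after it, then the
-- operator, then recurse on the remainder
def pvGoB : List Char → List Char
  | [] => []
  | op :: rest => rest.takeWhile pvIsDig ++ [op] ++ pvGoB (rest.dropWhile pvIsDig)
termination_by l => l.length
decreasing_by
  exact Nat.lt_succ_of_le (List.length_dropWhile_le pvIsDig rest)

def get_postfix_alt (infix_ : String) (n : Int) : String :=
  let s := PySem.List.slice infix_.toList none (some (max n 0))   -- infix[:max(n, 0)]
  String.ofList (s.takeWhile pvIsDig ++ pvGoB (s.dropWhile pvIsDig))

-- ===== PRECONDITION & SPEC =====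
-- A raises IndexError when n exceeds the string length (infix[i] for i ≥ len); exactly those inputs are excluded.
def Pre_get_postfix (infix_ : String) (n : Int) : Prop := n ≤ (infix_.toList.length : Int)
instance (infix_ : String) (n : Int) : Decidable (Pre_get_postfix infix_ n) := by unfold Pre_get_postfix; infer_instance
def pvWitness_get_postfix : String × Int := ("1+2*3", 5)

def Spec_get_postfix (infix_ : String) (n : Int) (out : String) : Prop := out = get_postfix_alt infix_ n
instance (infix_ : String) (n : Int) (out : String) : Decidable (Spec_get_postfix infix_ n out) := by unfold Spec_get_postfix; infer_instance

-- ===== CLAIM (what is proved, stated in full; the proofs are below) =====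
def Claim_equal_get_postfix : Prop := ∀ (infix_ : String) (n : Int), Dom_get_postfix infix_ n → Pre_get_postfix infix_ n → Spec_get_postfix infix_ n (get_postfix infix_ n)

-- ===== LEMMAS AND PROOFS =====

-- drain as a function of the loop's final state
def pvOut (r : List Char × List Char) : List Char := pvDrainA r.1 r.2

lemma pvGoB_nil : pvGoB [] = [] := by rw [pvGoB.eq_def]

lemma pvGoB_cons (op : Char) (rest : List Char) :
    pvGoB (op :: rest) = rest.takeWhile pvIsDig ++ [op] ++ pvGoB (rest.dropWhile pvIsDig) := by
  rw [pvGoB.eq_def]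

lemma pvDrainA_eq (p q : List Char) : pvDrainA p q = p ++ q := by
  induction q generalizing p with
  | nil => simp [pvDrainA]
  | cons t rest ih => simp [pvDrainA, ih]

-- from a one-operator stack, A's loop emits the following digit run, then that operator,
-- then behaves like pvGoB on the remainder
lemma pv_op (s : List Char) : ∀ (p : List Char) (op : Char),
    pvOut (s.foldl pvBodyA (p, [op])) =
      p ++ s.takeWhile pvIsDig ++ [op] ++ pvGoB (s.dropWhile pvIsDig) := by
  induction s with
  | nil => intro p op; simp [pvOut, pvDrainA_eq, pvGoB_nil]
  | cons c t ih =>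
    intro p op
    by_cases hd : '0' ≤ c ∧ c ≤ '9'
    · have hb : pvIsDig c = true := by simp [pvIsDig, hd]
      have hstep : pvBodyA (p, [op]) c = (p ++ [c], [op]) := by simp [pvBodyA, hd]
      rw [List.foldl_cons, hstep, ih (p ++ [c]) op]
      simp [hb]
    · have hb : ¬ pvIsDig c = true := by simp [pvIsDig, hd]
      have hstep : pvBodyA (p, [op]) c = (p ++ [op], [c]) := by simp [pvBodyA, hd]
      rw [List.foldl_cons, hstep, ih (p ++ [op]) c]
      conv_rhs => rw [List.dropWhile_cons, if_neg hb, pvGoB_cons]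
      simp [hb]

-- from the empty stack, A's loop computes B's run decomposition
lemma pv_nil (s : List Char) : ∀ (p : List Char),
    pvOut (s.foldl pvBodyA (p, [])) =
      p ++ s.takeWhile pvIsDig ++ pvGoB (s.dropWhile pvIsDig) := by
  induction s with
  | nil => intro p; simp [pvOut, pvDrainA_eq, pvGoB_nil]
  | cons c t ih =>
    intro p
    by_cases hd : '0' ≤ c ∧ c ≤ '9'
    · have hb : pvIsDig c = true := by simp [pvIsDig, hd]
      have hstep : pvBodyA (p, []) c = (p ++ [c], []) := by simp [pvBodyA, hd]
      rw [List.foldl_cons, hstep, ih (p ++ [c])]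
      simp [hb]
    · have hb : ¬ pvIsDig c = true := by simp [pvIsDig, hd]
      have hstep : pvBodyA (p, []) c = (p, [c]) := by simp [pvBodyA, hd]
      rw [List.foldl_cons, hstep, pv_op t p c]
      conv_rhs => rw [List.dropWhile_cons, if_neg hb, pvGoB_cons]
      simp [hb]

-- ===== VERDICT (by name: the statement is the Claim_ definition above) =====
theorem get_postfix_spec : Claim_equal_get_postfix := by
  intro infix_ n _ hpre
  unfold Spec_get_postfix get_postfix get_postfix_alt
  dsimp only
  set cs := infix_.toList with hcs
  unfold Pre_get_postfix at hpre
  rw [← hcs] at hpre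
  by_cases hn0 : n ≤ 0
  · have hmax : max n 0 = 0 := by omega
    rw [PySem.List.pyRange_one_eq_nil hn0, hmax]
    rw [show PySem.List.slice cs none (some (0:Int)) = cs.take (0:Int).toNat from
      PySem.List.slice_to cs (by omega)]
    simp [pvDrainA_eq, pvGoB_nil]
  · have hn : 0 < n := by omega
    have hle : n.toNat ≤ cs.length := by omega
    set s : List Char := cs.take n.toNat with hs
    have hslen : s.length = n.toNat := by
      simp [hs, List.length_take, Nat.min_eq_left hle]
    have hcast : ((s.length : Int)) = n := by rw [hslen]; omega
    have hcongr : (PySem.List.pyRange 0 n 1).foldl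
        (fun acc i => pvBodyA acc (PySem.List.pyGetD cs i ' ')) ([], []) =
        (PySem.List.pyRange 0 n 1).foldl
        (fun acc i => pvBodyA acc (PySem.List.pyGetD s i ' ')) ([], []) := by
      apply PySem.List.foldl_congr_mem
      intro acc i hi
      rw [PySem.List.mem_pyRange_one] at hi
      have hb1 : i.toNat < cs.length := by omega
      have hb2 : i.toNat < s.length := by omega
      have hd1 : PySem.List.pyGetD cs i ' ' = cs[i.toNat] :=
        PySem.List.pyGetD_eq_getElem (xs := cs) (i := i) (d := ' ') hi.1 (by exact_mod_cast by omega)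
      have hd2 : PySem.List.pyGetD s i ' ' = s[i.toNat] :=
        PySem.List.pyGetD_eq_getElem (xs := s) (i := i) (d := ' ') hi.1 (by rw [hcast]; exact hi.2)
      rw [hd1, hd2]
      simp [hs, List.getElem_take]
    rw [hcongr, ← hcast,
        PySem.List.foldl_pyRange_zero_pyGetD' s ' ' pvBodyA ([], [])]
    have hb := pv_nil s []
    simp only [pvOut] at hb
    rw [hb]
    rw [show max ((s.length : Int)) 0 = ((s.length : Nat) : Int) from by omega,
        PySem.List.slice_to_natCast, hslen, ← hs]
    simp
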